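-- pv_equiv track=rewrite | github.com/kuza2010/Math_crypto | root.py | get_all_degree
-- ===== SOURCE A (Python) =====
-- import itertools
--
-- def get_all_degree(numbers: []):
--     degrees = set(numbers)
--
--     if len(numbers) > 2:
--         for length in range(2, len(numbers)):
--             for combination in itertools.combinations(numbers, length):
--                 degree = 1
--                 for each in combination:
--                     degree *= each
--                 degrees.add(degree)
--
--     return list(degrees)
-- ===== SOURCE B (Python) =====
-- def get_all_degree(numbers: []):
--     n = len(numbers)
--     degrees = set(numbers)
--     if n > 2:
--         # level k: (last position, product) of every size-k combination, in
--         # lexicographic position order; each product is one extension of its prefix's product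
--         level = list(enumerate(numbers))
--         for _ in range(2, n):
--             level = [(j2, p * numbers[j2]) for (j, p) in level for j2 in range(j + 1, n)]
--             degrees.update(p for (_, p) in level)
--     return list(degrees)
-- ===== Notes on version B (the rewrite author's own statement) =====
-- stated objective: alternative
-- what changed: Replaces per-combination recomputation of each product (itertools.combinations plus an O(k) inner multiply loop per combination) by a level-by-level DP that extends every size-k subset product to size k+1 with a single multiplication, emitting products in the same by-size lexicographic order.
import Mathlib
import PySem

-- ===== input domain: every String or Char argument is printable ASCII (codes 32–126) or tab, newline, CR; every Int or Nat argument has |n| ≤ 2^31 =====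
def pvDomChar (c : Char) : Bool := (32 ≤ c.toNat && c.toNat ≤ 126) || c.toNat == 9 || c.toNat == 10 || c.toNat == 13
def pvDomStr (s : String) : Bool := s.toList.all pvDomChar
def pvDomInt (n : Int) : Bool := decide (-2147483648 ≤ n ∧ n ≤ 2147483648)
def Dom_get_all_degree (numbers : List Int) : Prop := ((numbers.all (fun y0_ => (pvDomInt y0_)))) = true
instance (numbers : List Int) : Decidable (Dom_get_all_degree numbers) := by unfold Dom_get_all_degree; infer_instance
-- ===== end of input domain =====

-- B replaces the per-combination product loop (one O(k) inner loop per combination) by a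
-- level-by-level extension that computes every subset product with a single multiplication
-- from its prefix's product, keeping the same by-size lexicographic emission order.

-- ===== PORT A =====
-- itertools.combinations(xs, k): all k-element position-subsequences, lexicographic order
def combosA : Nat → List Int → List (List Int)
  | 0, _ => [[]]
  | _ + 1, [] => []
  | k + 1, x :: xs => (combosA k xs).map (fun c => x :: c) ++ combosA (k + 1) xs

def get_all_degree (numbers : List Int) : List Int :=
  let degrees : PySem.Set Int := PySem.Set.ofList numbers
  if ((numbers.length : Int)) > 2 then
    (PySem.List.pyRange 2 (numbers.length : Int) 1).foldl
      (fun degrees length =>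
        (combosA length.toNat numbers).foldl
          (fun degrees combination =>
            PySem.Set.add degrees (combination.foldl (fun degree each => degree * each) 1))
          degrees)
      degrees
  else degrees

-- ===== PORT B =====
def get_all_degree_alt (numbers : List Int) : List Int :=
  let n : Int := (numbers.length : Int)
  let degrees : PySem.Set Int := PySem.Set.ofList numbers
  if n > 2 then
    let level : List (Int × Int) := PySem.List.enumerate numbers 0
    ((PySem.List.pyRange 2 n 1).foldl
      (fun (st : PySem.Set Int × List (Int × Int)) _ =>
        let level := st.2.flatMap (fun jp =>
          (PySem.List.pyRange (jp.1 + 1) n 1).map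
            (fun j2 => (j2, jp.2 * PySem.List.pyGetD numbers j2 0)))
        (PySem.Set.update st.1 (level.map Prod.snd), level))
      (degrees, level)).1
  else degrees

-- ===== PRECONDITION & SPEC =====
def Spec_get_all_degree (numbers : List Int) (out : List Int) : Prop := out = get_all_degree_alt numbers
instance (numbers : List Int) (out : List Int) : Decidable (Spec_get_all_degree numbers out) := by unfold Spec_get_all_degree; infer_instance

-- ===== CLAIM (what is proved, stated in full; the proofs are below) =====
def Claim_equal_get_all_degree : Prop := ∀ (numbers : List Int), Dom_get_all_degree numbers → Spec_get_all_degree numbers (get_all_degree numbers)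

-- ===== LEMMAS AND PROOFS =====

-- (last position, product) of every node k levels below the node (j, p), lex order
def desc (numbers : List Int) : Nat → Int → Int → List (Int × Int)
  | 0, j, p => [(j, p)]
  | k + 1, j, p =>
      ((PySem.List.pyRange (j + 1) (numbers.length : Int) 1).map
        (fun j2 => (j2, p * PySem.List.pyGetD numbers j2 0))).flatMap
        (fun e => desc numbers k e.1 e.2)

-- B's one level-extension step applied to all descendants = descendants one level deeper
lemma step_desc (numbers : List Int) (k : Nat) : ∀ (j p : Int),
    (desc numbers k j p).flatMap (fun jp =>
      (PySem.List.pyRange (jp.1 + 1) (numbers.length : Int) 1).map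
        (fun j2 => (j2, jp.2 * PySem.List.pyGetD numbers j2 0)))
    = desc numbers (k + 1) j p := by
  induction k with
  | zero =>
      intro j p
      simp [desc]
  | succ k ih =>
      intro j p
      show (desc numbers (k + 1) j p).flatMap _ = desc numbers (k + 2) j p
      rw [desc]
      rw [List.flatMap_assoc]
      rw [show desc numbers (k + 2) j p =
        ((PySem.List.pyRange (j + 1) (numbers.length : Int) 1).map
          (fun j2 => (j2, p * PySem.List.pyGetD numbers j2 0))).flatMap
          (fun e => desc numbers (k + 1) e.1 e.2) from rfl]
      congr 1
      funext e
      exact ih e.1 e.2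

-- first-element decomposition of lex-ordered combinations
lemma combosA_pos (k : Nat) : ∀ (ys : List Int),
    combosA (k + 1) ys =
      (List.range ys.length).flatMap
        (fun i => (combosA k (ys.drop (i + 1))).map (fun c => ys.getD i 0 :: c)) := by
  intro ys
  induction ys with
  | nil => simp [combosA]
  | cons x xs ih =>
      rw [show combosA (k + 1) (x :: xs)
            = (combosA k xs).map (fun c => x :: c) ++ combosA (k + 1) xs from rfl]
      rw [List.length_cons, List.range_succ_eq_map, List.flatMap_cons, List.flatMap_map]
      simp only [List.drop_succ_cons, List.drop_zero, List.getD_cons_zero, List.getD_cons_succ,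
        Nat.succ_eq_add_one]
      rw [ih]

-- the products of the k-step descendants of (j, p) are the products of the
-- k-element combinations of the suffix after position j, folded onto p, in the same order
lemma prod_desc (numbers : List Int) (k : Nat) : ∀ (j p : Int), -1 ≤ j →
    (desc numbers k j p).map Prod.snd
      = (combosA k (numbers.drop (j + 1).toNat)).map
          (fun c => c.foldl (fun degree each => degree * each) p) := by
  induction k with
  | zero =>
      intro j p _
      simp [desc, combosA]
  | succ k ih =>
      intro j p hj
      rw [desc, List.map_flatMap, List.flatMap_map]
      rw [PySem.List.pyRange_one (j + 1) (numbers.length : Int)]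
      rw [List.flatMap_map]
      rw [combosA_pos, List.map_flatMap]
      have hlen : ((numbers.length : Int) - (j + 1)).toNat = (numbers.drop (j + 1).toNat).length := by
        rw [List.length_drop]; omega
      rw [hlen]
      congr 1
      funext t
      have h0 : (0:Int) ≤ j + 1 + (t : Int) := by omega
      rw [ih (j + 1 + (t : Int)) _ (by omega)]
      rw [List.map_map]
      have hdrop : numbers.drop ((j + 1 + (t : Int)) + 1).toNat
          = (numbers.drop (j + 1).toNat).drop (t + 1) := by
        rw [List.drop_drop]
        have harith : ((j + 1 + (t : Int)) + 1).toNat = (j + 1).toNat + (t + 1) := by omega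
        rw [harith]
      rw [hdrop]
      congr 1
      funext c
      have hget : PySem.List.pyGetD numbers (j + 1 + (t : Int)) 0
          = (numbers.drop (j + 1).toNat).getD t 0 := by
        have harith2 : (j + 1 + (t : Int)).toNat = (j + 1).toNat + t := by omega
        rw [PySem.List.pyGetD_of_nonneg numbers 0 h0, harith2]
        unfold List.getD
        rw [List.getElem?_drop]
      simp only [Function.comp, List.foldl_cons, hget]

-- the initial level (enumerate) is the 1-step descendants of the virtual root (-1, 1)
lemma level_init (numbers : List Int) :
    PySem.List.enumerate numbers 0 = desc numbers 1 (-1) 1 := by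
  rw [desc]
  simp only [neg_add_cancel]
  rw [PySem.List.enumerate_eq_map_pyRange numbers 0]
  rw [show PySem.List.len numbers = (numbers.length : Int) from rfl]
  simp [desc, one_mul]

-- main loop synchronisation: A's fold over the remaining lengths equals the first
-- component of B's fold, when B's level holds the (a-1)-step descendants of the root
lemma loop_eq (numbers : List Int) : ∀ (m : Nat) (a : Int) (d : PySem.Set Int),
    2 ≤ a → a + (m : Int) = (numbers.length : Int) →
    (PySem.List.pyRange a (numbers.length : Int) 1).foldl
      (fun degrees length =>
        (combosA length.toNat numbers).foldl
          (fun degrees combination =>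
            PySem.Set.add degrees (combination.foldl (fun degree each => degree * each) 1))
          degrees)
      d
    = ((PySem.List.pyRange a (numbers.length : Int) 1).foldl
        (fun (st : PySem.Set Int × List (Int × Int)) _ =>
          let level := st.2.flatMap (fun jp =>
            (PySem.List.pyRange (jp.1 + 1) (numbers.length : Int) 1).map
              (fun j2 => (j2, jp.2 * PySem.List.pyGetD numbers j2 0)))
          (PySem.Set.update st.1 (level.map Prod.snd), level))
        (d, desc numbers (a - 1).toNat (-1) 1)).1 := by
  intro m
  induction m with
  | zero =>
      intro a d _ hsum
      rw [PySem.List.pyRange_one_eq_nil (by omega)]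
      simp
  | succ m ih =>
      intro a d ha hsum
      rw [PySem.List.pyRange_one_cons (by omega : a < (numbers.length : Int))]
      rw [List.foldl_cons, List.foldl_cons]
      have hstep := step_desc numbers (a - 1).toNat (-1) 1
      have hk : (a - 1).toNat + 1 = (a + 1 - 1).toNat := by omega
      have hprod := prod_desc numbers ((a + 1 - 1).toNat) (-1) 1 (by omega)
      have hzero : ((-1 : Int) + 1).toNat = 0 := by omega
      rw [hzero, List.drop_zero] at hprod
      have htn : (a + 1 - 1).toNat = a.toNat := by omega
      -- rewrite B's first step
      simp only []
      rw [hstep, hk]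
      -- rewrite A's first step: fold of adds over combos = Set.update with mapped products
      have hup : (combosA a.toNat numbers).foldl
          (fun degrees combination =>
            PySem.Set.add degrees (combination.foldl (fun degree each => degree * each) 1)) d
          = PySem.Set.update d ((desc numbers (a + 1 - 1).toNat (-1) 1).map Prod.snd) := by
        rw [hprod, htn]
        rw [show ∀ (s : PySem.Set Int) (xs : List Int),
              PySem.Set.update s xs = xs.foldl PySem.Set.add s from fun _ _ => rfl]
        rw [List.foldl_map]
      rw [hup]
      exact ih (a + 1) _ (by omega) (by omega)

-- ===== VERDICT (by name: the statement is the Claim_ definition above) =====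
theorem get_all_degree_spec : Claim_equal_get_all_degree := by
  intro numbers _
  unfold Spec_get_all_degree get_all_degree get_all_degree_alt
  by_cases h : ((numbers.length : Int)) > 2
  · simp only [h, if_true]
    rw [level_init numbers]
    have := loop_eq numbers (numbers.length - 2) 2 (PySem.Set.ofList numbers)
      (by omega) (by omega)
    rw [show ((2:Int) - 1).toNat = 1 from rfl] at this
    exact this
  · simp only [h, if_false]
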